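-- pv_equiv track=rewrite | github.com/guoziqingbupt/Decision_Tree | AttributeSelection.py | dataPartition
-- ===== SOURCE A (Python) =====
-- def dataPartition(data, attribute):
--     """
--     Partitioning the data according to an attribute
--     :param data: dataset that contains data objects, is a tuple: (obj_1, ..., obj_n)
--     :param attribute: an attribute
--     :return: a dictionary attributeValue_subset, as form as {attributeValue_1: subset_1,... }
--     """
--
--     attributeValue_subset = {}
--
--     for obj in data:
--
--         attributeValue = obj[attribute]
--
--         if attributeValue not in attributeValue_subset:
--             attributeValue_subset[attributeValue] = [obj]
--         else:
--             attributeValue_subset[attributeValue].append(obj)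
--
--     for key in attributeValue_subset:
--         attributeValue_subset[key] = tuple(attributeValue_subset[key])
--
--     return attributeValue_subset
-- ===== SOURCE B (Python) =====
-- def dataPartition(data, attribute):
--     """Same partition: one pass collects the distinct attribute values in
--     first-appearance order, then a dict comprehension filters data once per
--     distinct value."""
--     values = []
--     for obj in data:
--         v = obj[attribute]
--         if v not in values:
--             values.append(v)
--     return {v: tuple(obj for obj in data if obj[attribute] == v) for v in values}
-- ===== Notes on version B (the rewrite author's own statement) =====
-- stated objective: alternative
-- what changed: Replaces the incremental dict-grouping pass (insert-or-append per row) by a distinct-value collection pass followed by one filtering scan of the data per distinct value, built with a dict comprehension.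
import Mathlib
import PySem

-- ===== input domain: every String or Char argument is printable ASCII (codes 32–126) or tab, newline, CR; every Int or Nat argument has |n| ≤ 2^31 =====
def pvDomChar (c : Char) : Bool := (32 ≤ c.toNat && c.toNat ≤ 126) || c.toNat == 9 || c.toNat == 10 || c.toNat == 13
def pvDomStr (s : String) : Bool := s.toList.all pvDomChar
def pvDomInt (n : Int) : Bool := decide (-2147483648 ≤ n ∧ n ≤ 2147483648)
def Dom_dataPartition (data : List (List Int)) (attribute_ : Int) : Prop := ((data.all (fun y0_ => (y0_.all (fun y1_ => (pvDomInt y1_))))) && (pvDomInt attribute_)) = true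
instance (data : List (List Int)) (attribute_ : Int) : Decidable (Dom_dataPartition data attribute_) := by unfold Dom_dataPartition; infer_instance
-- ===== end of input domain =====

-- ===== PORT A =====
-- B changes the decomposition: A groups incrementally into a dict; B collects distinct values, then filters per value (alternative, same result).
-- obj[attribute] is ported as PySem.List.pyGetD obj attribute_ 0; the default 0 is only reachable
-- outside Pre_dataPartition (where the Python raises IndexError).
-- The second Python loop replaces each value by tuple(value); under the type convention
-- (tuple -> List) this is the identity, so the dict is returned as its items.
def dataPartition (data : List (List Int)) (attribute_ : Int) : List (Int × List (List Int)) :=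
  (data.foldl (fun d obj =>
      let attributeValue := PySem.List.pyGetD obj attribute_ 0
      if d.contains attributeValue = false then d.insert attributeValue [obj]
      else d.modify attributeValue [] (fun l => l ++ [obj]))
    PySem.Dict.empty).items

-- ===== PORT B =====
-- first loop of Source B: distinct attribute values in first-appearance order (list with `not in` = PySem.Set.add)
def dataPartition_alt (data : List (List Int)) (attribute_ : Int) : List (Int × List (List Int)) :=
  let values := data.foldl
    (fun acc obj => PySem.Set.add acc (PySem.List.pyGetD obj attribute_ 0)) PySem.Set.empty
  values.map (fun v => (v, data.filter (fun obj => PySem.List.pyGetD obj attribute_ 0 == v)))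

-- ===== PRECONDITION & SPEC =====
-- Pre_ excludes exactly the inputs where obj[attribute] raises IndexError in Python.
def Pre_dataPartition (data : List (List Int)) (attribute_ : Int) : Prop :=
  ∀ obj ∈ data, PySem.Raise.InRange obj.length attribute_
instance (data : List (List Int)) (attribute_ : Int) : Decidable (Pre_dataPartition data attribute_) := by
  unfold Pre_dataPartition; infer_instance
def pvWitness_dataPartition : List (List Int) × Int := ([[1, 2], [3, 4], [1, 5]], 0)
def Spec_dataPartition (data : List (List Int)) (attribute_ : Int) (out : List (Int × List (List Int))) : Prop := out = dataPartition_alt data attribute_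
instance (data : List (List Int)) (attribute_ : Int) (out : List (Int × List (List Int))) : Decidable (Spec_dataPartition data attribute_ out) := by unfold Spec_dataPartition; infer_instance

-- ===== CLAIM (what is proved, stated in full; the proofs are below) =====
def Claim_equal_dataPartition : Prop := ∀ (data : List (List Int)) (attribute_ : Int), Dom_dataPartition data attribute_ → Pre_dataPartition data attribute_ → Spec_dataPartition data attribute_ (dataPartition data attribute_)

-- ===== LEMMAS AND PROOFS =====

-- a Dict with duplicate-free keys is exactly its keys paired with their looked-up values
theorem pv_items_eq_keys_map (d : PySem.Dict Int (List (List Int))) (h : d.keys.Nodup) :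
    d.items = d.keys.map (fun c => (c, d.getD c [])) := by
  unfold PySem.Dict.keys
  rw [List.map_map]
  conv_lhs => rw [← List.map_id d.items]
  apply List.map_congr_left
  intro p hp
  have : d.getD p.1 [] = p.2 := PySem.Dict.getD_of_mem_items d (by simpa using hp) h []
  simp [this]

-- A's insert-or-append branch is Python's d[v] = d.get(v, []) + [obj] in both cases
theorem pv_step_eq_modify (d : PySem.Dict Int (List (List Int))) (v : Int) (obj : List Int) :
    (if d.contains v = false then d.insert v [obj]
     else d.modify v [] (fun l => l ++ [obj])) = d.modify v [] (fun l => l ++ [obj]) := by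
  by_cases hc : d.contains v = false
  · simp [hc, PySem.Dict.modify, PySem.Dict.getD_of_not_contains d [] hc]
  · simp [hc]

-- the two programs agree on every input (the totalised key makes this unconditional)
theorem pv_main (data : List (List Int)) (attribute_ : Int) :
    dataPartition data attribute_ = dataPartition_alt data attribute_ := by
  unfold dataPartition dataPartition_alt
  have hfold :
      data.foldl (fun d obj =>
          let attributeValue := PySem.List.pyGetD obj attribute_ 0
          if d.contains attributeValue = false then d.insert attributeValue [obj]
          else d.modify attributeValue [] (fun l => l ++ [obj])) PySem.Dict.empty
        = data.foldl (fun d obj =>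
            d.modify (PySem.List.pyGetD obj attribute_ 0) [] (fun l => l ++ [obj]))
            PySem.Dict.empty := by
    congr 1
    funext d obj
    exact pv_step_eq_modify d _ obj
  rw [hfold]
  set k : List Int → Int := fun obj => PySem.List.pyGetD obj attribute_ 0 with hk
  set D := data.foldl (fun d obj => d.modify (k obj) [] (fun l => l ++ [obj])) PySem.Dict.empty with hD
  have hkeys : D.keys = PySem.Set.update PySem.Dict.empty.keys (data.map k) :=
    PySem.Dict.keys_foldl_modify_key data k [] (fun _ obj => fun l => l ++ [obj]) PySem.Dict.empty
  have hkeys' : D.keys = data.foldl (fun acc obj => PySem.Set.add acc (k obj)) PySem.Set.empty := by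
    rw [hkeys]
    simp [PySem.Set.update, PySem.Dict.keys_empty, PySem.Set.empty, List.foldl_map]
  have hnodup : D.keys.Nodup := by
    rw [hkeys']
    have hof : PySem.Set.ofList (data.map k) = List.foldl PySem.Set.add PySem.Set.empty (data.map k) :=
      PySem.Set.ofList_eq_foldl _
    rw [List.foldl_map] at hof
    rw [← hof]
    exact PySem.Set.nodup_ofList _
  have hgetD : ∀ c : Int, D.getD c [] = data.filter (fun obj => k obj == c) := by
    intro c
    have happ := PySem.Dict.getD_foldl_modify_append
      (data.map (fun obj => (k obj, obj)))
      (PySem.Dict.empty : PySem.Dict Int (List (List Int))) c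
    rw [List.foldl_map] at happ
    rw [hD, happ]
    rw [List.filter_map, List.map_map]
    simp [Function.comp_def]
  rw [pv_items_eq_keys_map D hnodup, hkeys']
  apply List.map_congr_left
  intro c _
  rw [hgetD c]

-- ===== VERDICT (by name: the statement is the Claim_ definition above) =====
theorem dataPartition_spec : Claim_equal_dataPartition := by
  intro data attribute_ _ _
  unfold Spec_dataPartition
  exact pv_main data attribute_
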